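-- pv_equiv track=rewrite | github.com/alwaysPKU/shua_ti | sai_ma/ji_gu_chuan_hua.py | solution
-- ===== SOURCE A (Python) =====
-- def solution(n, m):
--     dp = [[0]*(31) for i in range(31)]
--     dp[1][1] = 1
--     dp[1][n-1] = 1
--     for i in range(2, m+1):
--         for j in range(0, n):
--             dp[i][j] = dp[i - 1][(n-j-1) % n] + dp[i - 1][(n-j+1) % n]
--     return dp[m][0]
-- ===== SOURCE B (Python) =====
-- def solution(n, m):
--     # top-down memoized recursion: f(i, j) = number of ways to be at position j after i passes
--     memo = {}
--
--     def f(i, j):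
--         if i < 1:
--             return 0
--         if i == 1:
--             return 1 if (j == 1 or j == n - 1) else 0
--         if (i, j) not in memo:
--             memo[(i, j)] = f(i - 1, (n - j - 1) % n) + f(i - 1, (n - j + 1) % n)
--         return memo[(i, j)]
--
--     return f(m, 0)
-- ===== Notes on version B (the rewrite author's own statement) =====
-- stated objective: alternative
-- what changed: Replaces A's bottom-up fixed 31x31 table with a top-down memoized recursion f(i,j) on (steps, position), so no array is allocated and only reachable states are computed; Pre_ excludes n = 0 with m >= 2, where A returns 0 from an untouched table row while B's modulus-n recursion raises ZeroDivisionError.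
-- intended difference: On the three corner inputs in D_ (e.g. the witness (1, -30)) A returns 1 only because Python's negative indexing into the size-31 table aliases dp[1][-31] to dp[1][0] and dp[-30] to dp[1]; B returns 0, the intended count for a degenerate circle of -30 people or for -30 passes. — e.g. on solution(1, -30): A returns 1, B returns 0
-- outside the precondition, e.g. on solution(0, 2): A returns 0, B raises ZeroDivisionError
import Mathlib
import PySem

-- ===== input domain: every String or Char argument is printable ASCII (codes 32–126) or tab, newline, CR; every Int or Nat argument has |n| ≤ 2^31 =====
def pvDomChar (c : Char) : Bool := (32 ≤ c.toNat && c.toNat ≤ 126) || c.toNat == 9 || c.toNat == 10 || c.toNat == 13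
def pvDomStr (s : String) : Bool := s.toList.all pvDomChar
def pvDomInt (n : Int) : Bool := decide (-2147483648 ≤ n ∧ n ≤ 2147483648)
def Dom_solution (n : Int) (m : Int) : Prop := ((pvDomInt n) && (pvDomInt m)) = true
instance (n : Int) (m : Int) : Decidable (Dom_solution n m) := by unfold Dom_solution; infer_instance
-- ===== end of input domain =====

-- B replaces A's bottom-up fixed-size 31x31 table with a top-down memoized recursion on
-- (steps, position); an alternative decomposition of the same recurrence (no speed claim).

-- ===== PORT A =====
def solution (n : Int) (m : Int) : Int :=
  let dp : List (List Int) := (PySem.List.pyRange 0 31 1).map (fun _ => List.replicate 31 (0 : Int))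
  let dp := PySem.List.pySetD dp 1 (PySem.List.pySetD (PySem.List.pyGetD dp 1 []) 1 1)
  let dp := PySem.List.pySetD dp 1 (PySem.List.pySetD (PySem.List.pyGetD dp 1 []) (n - 1) 1)
  let dp := (PySem.List.pyRange 2 (m + 1) 1).foldl (fun dp i =>
    (PySem.List.pyRange 0 n 1).foldl (fun dp j =>
      PySem.List.pySetD dp i (PySem.List.pySetD (PySem.List.pyGetD dp i [])
        j (PySem.List.pyGetD (PySem.List.pyGetD dp (i - 1) []) (PySem.Int.mod (n - j - 1) n) 0
           + PySem.List.pyGetD (PySem.List.pyGetD dp (i - 1) []) (PySem.Int.mod (n - j + 1) n) 0))) dp) dp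
  PySem.List.pyGetD (PySem.List.pyGetD dp m []) 0 0

-- ===== PORT B =====
def fAlt (n : Int) (i : Int) (j : Int) (memo : PySem.Dict (Int × Int) Int) :
    Int × PySem.Dict (Int × Int) Int :=
  if i < 1 then (0, memo)
  else if i = 1 then ((if j = 1 ∨ j = n - 1 then 1 else 0), memo)
  else match memo.get? (i, j) with
    | some v => (v, memo)
    | none =>
      let p := fAlt n (i - 1) (PySem.Int.mod (n - j - 1) n) memo
      let q := fAlt n (i - 1) (PySem.Int.mod (n - j + 1) n) p.2
      let v := p.1 + q.1
      (v, q.2.insert (i, j) v)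
termination_by i.toNat
decreasing_by all_goals omega

def solution_alt (n : Int) (m : Int) : Int := (fAlt n m 0 PySem.Dict.empty).1

-- ===== PRECONDITION & SPEC =====
-- Pre_ excludes the inputs on which A raises IndexError (n or m indexing outside the fixed
-- 31-slot table), and the carve-out n = 0 with m ≥ 2, where A returns 0 from an untouched
-- table row while B's modulus-n recursion raises ZeroDivisionError.
def Pre_solution (n : Int) (m : Int) : Prop :=
  (-30 ≤ n ∧ n ≤ 31) ∧ (-31 ≤ m ∧ m ≤ 30) ∧ ¬(n = 0 ∧ 2 ≤ m)
instance (n : Int) (m : Int) : Decidable (Pre_solution n m) := by unfold Pre_solution; infer_instance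
def pvWitness_solution : Int × Int := (3, 5)

-- On the three corner inputs in D_ (e.g. the witness (1, -30)) A returns 1 only because Python's
-- negative indexing into the size-31 table aliases dp[1][-31] to dp[1][0] and dp[-30] to dp[1];
-- B returns 0, the intended count for a degenerate circle of -30 people or for -30 passes.
def D_solution (n : Int) (m : Int) : Prop :=
  (n = 1 ∧ m = -30) ∨ (n = -30 ∧ m = 1) ∨ (n = -30 ∧ m = -30)
instance (n : Int) (m : Int) : Decidable (D_solution n m) := by unfold D_solution; infer_instance

def Spec_solution (n : Int) (m : Int) (out : Int) : Prop := ¬ D_solution n m → out = solution_alt n m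
instance (n : Int) (m : Int) (out : Int) : Decidable (Spec_solution n m out) := by unfold Spec_solution; infer_instance

def pvDiffWitness_solution : Int × Int := (1, -30)
def pvDiffWitnessOut_solution : Int × Int := (1, 0)

-- ===== CLAIM (what is proved, stated in full; the proofs are below) =====
def Claim_unchanged_solution : Prop := ∀ (n : Int) (m : Int), Dom_solution n m → Pre_solution n m → Spec_solution n m (solution n m)
def Claim_changed_solution : Prop := Dom_solution (pvDiffWitness_solution.1) (pvDiffWitness_solution.2) ∧ Pre_solution (pvDiffWitness_solution.1) (pvDiffWitness_solution.2) ∧ D_solution (pvDiffWitness_solution.1) (pvDiffWitness_solution.2) ∧ solution (pvDiffWitness_solution.1) (pvDiffWitness_solution.2) = pvDiffWitnessOut_solution.1 ∧ solution_alt (pvDiffWitness_solution.1) (pvDiffWitness_solution.2) = pvDiffWitnessOut_solution.2 ∧ pvDiffWitnessOut_solution.1 ≠ pvDiffWitnessOut_solution.2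
def Claim_exact_solution : Prop := ∀ (n : Int) (m : Int), Dom_solution n m → Pre_solution n m → D_solution n m → solution n m ≠ solution_alt n m

-- ===== LEMMAS AND PROOFS =====

def gB (n : Int) (i : Int) (j : Int) : Int :=
  if i < 1 then 0
  else if i = 1 then (if j = 1 ∨ j = n - 1 then 1 else 0)
  else gB n (i - 1) (PySem.Int.mod (n - j - 1) n) + gB n (i - 1) (PySem.Int.mod (n - j + 1) n)
termination_by i.toNat
decreasing_by all_goals omega

def MemoInv (n : Int) (memo : PySem.Dict (Int × Int) Int) : Prop :=
  ∀ k v, memo.get? k = some v → v = gB n k.1 k.2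

theorem fAlt_eq (n : Int) : ∀ (N : Nat) (i j : Int), i.toNat ≤ N → ∀ memo, MemoInv n memo →
    (fAlt n i j memo).1 = gB n i j ∧ MemoInv n (fAlt n i j memo).2 := by
  intro N
  induction N with
  | zero =>
    intro i j hi memo hm
    have hlt : i < 1 := by omega
    rw [fAlt, gB]
    simp [hlt, hm]
  | succ N ih =>
    intro i j hi memo hm
    by_cases h1 : i < 1
    · rw [fAlt, gB]; simp [h1, hm]
    · by_cases h2 : i = 1
      · rw [fAlt, gB]; simp [h2, hm]
      · rw [fAlt, gB]
        simp only [h1, h2, if_false]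
        cases hget : memo.get? (i, j) with
        | some v =>
          have := hm (i, j) v hget
          refine ⟨?_, hm⟩
          simp only [this]
          rw [gB]
          simp [h1, h2]
        | none =>
          have hi' : (i - 1).toNat ≤ N := by omega
          obtain ⟨hp1, hp2⟩ := ih (i - 1) (PySem.Int.mod (n - j - 1) n) hi' memo hm
          obtain ⟨hq1, hq2⟩ := ih (i - 1) (PySem.Int.mod (n - j + 1) n) hi'
            (fAlt n (i - 1) (PySem.Int.mod (n - j - 1) n) memo).2 hp2
          constructor
          · simp [hp1, hq1]
          · intro k v hv
            rw [PySem.Dict.get?_insert] at hv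
            split at hv
            · rename_i hk
              subst hk
              simp only [Option.some.injEq] at hv
              rw [← hv, hp1, hq1]
              conv_rhs => rw [gB]
              simp [h1, h2]
            · exact hq2 k v hv

theorem solution_alt_eq (n m : Int) : solution_alt n m = gB n m 0 := by
  have h := fAlt_eq n m.toNat m 0 le_rfl PySem.Dict.empty
    (by intro k v hv; simp [PySem.Dict.get?_empty] at hv)
  simpa [solution_alt] using h.1

-- gB facts
theorem gB_lt_one (n i j : Int) (h : i < 1) : gB n i j = 0 := by
  rw [gB]; simp [h]

theorem gB_one (n j : Int) : gB n 1 j = if j = 1 ∨ j = n - 1 then 1 else 0 := by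
  rw [gB]; simp

theorem gB_step (n i j : Int) (h : 2 ≤ i) :
    gB n i j = gB n (i - 1) (PySem.Int.mod (n - j - 1) n)
             + gB n (i - 1) (PySem.Int.mod (n - j + 1) n) := by
  rw [gB]; rw [if_neg (by omega), if_neg (by omega)]

theorem gB_neg (n : Int) (hn : n ≤ -1) :
    ∀ (N : Nat) (i j : Int), i.toNat ≤ N → n < j → j ≤ 0 → gB n i j = 0 := by
  intro N
  induction N with
  | zero =>
    intro i j hi hj1 hj2
    exact gB_lt_one n i j (by omega)
  | succ N ih =>
    intro i j hi hj1 hj2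
    by_cases h1 : i < 1
    · exact gB_lt_one n i j h1
    · by_cases h2 : i = 1
      · subst h2; rw [gB_one]; rw [if_neg (by omega)]
      · rw [gB_step n i j (by omega)]
        have hb1 := PySem.Int.mod_neg_bounds (a := n - j - 1) (b := n) (by omega)
        have hb2 := PySem.Int.mod_neg_bounds (a := n - j + 1) (b := n) (by omega)
        rw [ih (i-1) _ (by omega) hb1.1 hb1.2, ih (i-1) _ (by omega) hb2.1 hb2.2]
        norm_num

-- index helpers
def pyNat (len : Nat) (i : Int) : Nat := if 0 ≤ i then i.toNat else len - (-i).toNat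

theorem pyIdx_in (len : Nat) (i : Int) (h1 : -(len:Int) ≤ i) (h2 : i < (len:Int)) :
    PySem.List.pyIdx? len i = some (pyNat len i) := by
  unfold PySem.List.pyIdx? pyNat
  split_ifs with h
  · simp
  · simp

theorem pyGetD_in {α : Type} (xs : List α) (i : Int) (d : α)
    (h1 : -(xs.length:Int) ≤ i) (h2 : i < (xs.length:Int)) :
    PySem.List.pyGetD xs i d = xs.getD (pyNat xs.length i) d := by
  unfold PySem.List.pyGetD PySem.List.pyGet?
  rw [pyIdx_in _ _ h1 h2]
  have hlt : pyNat xs.length i < xs.length := by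
    unfold pyNat; split_ifs <;> omega
  simp [Option.bind, List.getD, List.getElem?_eq_getElem hlt]

theorem pySetD_in {α : Type} (xs : List α) (i : Int) (v : α)
    (h1 : -(xs.length:Int) ≤ i) (h2 : i < (xs.length:Int)) :
    PySem.List.pySetD xs i v = xs.set (pyNat xs.length i) v := by
  unfold PySem.List.pySetD PySem.List.pySet?
  rw [pyIdx_in _ _ h1 h2]
  rfl

theorem getD_set' {α : Type} (xs : List α) (a b : Nat) (v d : α)
    (hb : b < xs.length) :
    (xs.set a v).getD b d = if b = a ∧ a < xs.length then v else xs.getD b d := by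
  have hb' : b < (xs.set a v).length := by simpa using hb
  rw [List.getD_eq_getElem _ _ hb', List.getD_eq_getElem _ _ hb, List.getElem_set]
  by_cases h : a = b
  · subst h
    rw [if_pos rfl, if_pos ⟨rfl, hb⟩]
  · rw [if_neg h, if_neg (fun hc => h hc.1.symm)]

theorem getD_replicate {α : Type} (k : Nat) (c d : α) (b : Nat) (hb : b < k) :
    (List.replicate k c).getD b d = c := by
  rw [List.getD_eq_getElem _ _ (by simpa using hb)]
  simp

theorem foldl_id {α β : Type} (l : List β) (d : α) : l.foldl (fun d _ => d) d = d := by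
  induction l generalizing d <;> simp_all [List.foldl]

-- A-side structure
def rowBase (n : Int) : List Int :=
  PySem.List.pySetD ((List.replicate 31 (0 : Int)).set 1 1) (n - 1) 1

def baseTable (n : Int) : List (List Int) :=
  let dp : List (List Int) := (PySem.List.pyRange 0 31 1).map (fun _ => List.replicate 31 (0 : Int))
  let dp := PySem.List.pySetD dp 1 (PySem.List.pySetD (PySem.List.pyGetD dp 1 []) 1 1)
  PySem.List.pySetD dp 1 (PySem.List.pySetD (PySem.List.pyGetD dp 1 []) (n - 1) 1)

def innerA (n : Int) (i : Int) (dp : List (List Int)) (j : Int) : List (List Int) :=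
  PySem.List.pySetD dp i (PySem.List.pySetD (PySem.List.pyGetD dp i [])
    j (PySem.List.pyGetD (PySem.List.pyGetD dp (i - 1) []) (PySem.Int.mod (n - j - 1) n) 0
       + PySem.List.pyGetD (PySem.List.pyGetD dp (i - 1) []) (PySem.Int.mod (n - j + 1) n) 0))

def loopA (n : Int) (k : Int) : List (List Int) :=
  (PySem.List.pyRange 2 (k + 1) 1).foldl (fun dp i => (PySem.List.pyRange 0 n 1).foldl (innerA n i) dp) (baseTable n)

theorem solution_eq_read (n m : Int) :
    solution n m = PySem.List.pyGetD (PySem.List.pyGetD (loopA n m) m []) 0 0 := rfl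

theorem rowBase_length (n : Int) : (rowBase n).length = 31 := by
  unfold rowBase PySem.List.pySetD PySem.List.pySet?
  cases h : PySem.List.pyIdx? ((List.replicate 31 (0:Int)).set 1 1).length (n - 1) <;> simp

theorem baseTable_eq0 (n : Int) :
    baseTable n = PySem.List.pySetD
      ((List.replicate 31 (List.replicate 31 (0 : Int))).set 1 ((List.replicate 31 (0 : Int)).set 1 1))
      1 (rowBase n) := rfl

theorem baseTable_eq (n : Int) :
    baseTable n = (List.replicate 31 (List.replicate 31 (0 : Int))).set 1 (rowBase n) := by
  rw [baseTable_eq0, pySetD_in _ _ _ (by simp) (by simp)]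
  have h : pyNat ((List.replicate 31 (List.replicate 31 (0 : Int))).set 1 ((List.replicate 31 (0 : Int)).set 1 1)).length 1 = 1 := by
    simp [pyNat]
  rw [h, List.set_set]

theorem rowBase_get (n j : Int) (hn1 : 1 ≤ n) (hn31 : n ≤ 31) (hj0 : 0 ≤ j) (hjn : j < n) :
    PySem.List.pyGetD (rowBase n) j 0 = if j = 1 ∨ j = n - 1 then 1 else 0 := by
  unfold rowBase
  rw [pySetD_in _ _ _ (by simp; omega) (by simp; omega)]
  rw [pyGetD_in _ _ _ (by simp; omega) (by simp; omega)]
  simp only [List.length_set, List.length_replicate]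
  have hpj : pyNat 31 j = j.toNat := by unfold pyNat; simp [hj0]
  have hpn : pyNat 31 (n - 1) = (n - 1).toNat := by unfold pyNat; simp; omega
  rw [hpj, hpn]
  rw [getD_set' _ _ _ _ _ (by simp; omega)]
  by_cases hj : j = n - 1
  · rw [if_pos (by simp; omega), if_pos (Or.inr hj)]
  · rw [if_neg (by simp; omega)]
    rw [getD_set' _ _ _ _ _ (by simp; omega)]
    by_cases hj1 : j = 1
    · rw [if_pos (by simp; omega), if_pos (Or.inl hj1)]
    · rw [if_neg (by simp; omega), if_neg (by tauto), getD_replicate _ _ _ _ (by omega)]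

theorem rowBase_zero (n : Int) (h1 : -30 ≤ n) (h2 : n ≤ 31) :
    PySem.List.pyGetD (rowBase n) 0 0 = if n = 1 ∨ n = -30 then 1 else 0 := by
  interval_cases n <;> decide

theorem baseTable_read (n m : Int) (_hn1 : -30 ≤ n) (_hn2 : n ≤ 31) (hm1 : -31 ≤ m) (hm2 : m ≤ 30) :
    PySem.List.pyGetD (baseTable n) m [] = if m = 1 ∨ m = -30 then rowBase n else List.replicate 31 0 := by
  rw [baseTable_eq]
  rw [pyGetD_in _ _ _ (by simp; omega) (by simp; omega)]
  simp only [List.length_set, List.length_replicate]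
  have hb : pyNat 31 m < 31 := by unfold pyNat; split_ifs <;> omega
  rw [getD_set' _ _ _ _ _ (by simpa using hb)]
  simp only [List.length_replicate]
  by_cases h : m = 1 ∨ m = -30
  · have hp : pyNat 31 m = 1 := by unfold pyNat; split_ifs <;> omega
    rw [if_pos ⟨hp, by omega⟩, if_pos h]
  · have hp : ¬(pyNat 31 m = 1 ∧ (1:Nat) < 31) := by unfold pyNat; split_ifs <;> omega
    rw [if_neg hp, if_neg h, getD_replicate _ _ _ _ hb]

theorem pyNat_nonneg (len : Nat) (i : Int) (h : 0 ≤ i) : pyNat len i = i.toNat := by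
  unfold pyNat; simp [h]

theorem pyGetD_at {α : Type} (xs : List α) (i : Int) (d : α) (L : Nat)
    (hl : xs.length = L) (h0 : 0 ≤ i) (hL : i < (L:Int)) :
    PySem.List.pyGetD xs i d = xs.getD i.toNat d := by
  rw [pyGetD_in _ _ _ (by rw [hl]; omega) (by rw [hl]; omega), pyNat_nonneg _ _ h0]

theorem pySetD_at {α : Type} (xs : List α) (i : Int) (v : α) (L : Nat)
    (hl : xs.length = L) (h0 : 0 ≤ i) (hL : i < (L:Int)) :
    PySem.List.pySetD xs i v = xs.set i.toNat v := by
  rw [pySetD_in _ _ _ (by rw [hl]; omega) (by rw [hl]; omega), pyNat_nonneg _ _ h0]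

theorem inner_aux (n i : Int) (hn1 : 1 ≤ n) (hn31 : n ≤ 31) (hi2 : 2 ≤ i) (hi31 : i < 31)
    (dp : List (List Int)) (hlen : dp.length = 31)
    (hrows : ∀ r : Nat, r < 31 → (dp.getD r []).length = 31)
    (hprev : ∀ j : Int, 0 ≤ j → j < n →
      PySem.List.pyGetD (PySem.List.pyGetD dp (i - 1) []) j 0 = gB n (i - 1) j) :
    ∀ t : Int, 0 ≤ t → t ≤ n →
      ((PySem.List.pyRange 0 t 1).foldl (innerA n i) dp).length = 31 ∧
      (∀ r : Nat, r < 31 → ((((PySem.List.pyRange 0 t 1).foldl (innerA n i) dp)).getD r []).length = 31) ∧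
      (∀ r : Int, 0 ≤ r → r < 31 → r ≠ i →
        PySem.List.pyGetD ((PySem.List.pyRange 0 t 1).foldl (innerA n i) dp) r [] =
          PySem.List.pyGetD dp r []) ∧
      (∀ j : Int, 0 ≤ j → j < t →
        PySem.List.pyGetD (PySem.List.pyGetD ((PySem.List.pyRange 0 t 1).foldl (innerA n i) dp) i []) j 0
          = gB n i j) := by
  intro t ht0
  induction t, ht0 using Int.le_induction with
  | base =>
    intro _
    rw [PySem.List.pyRange_one_eq_nil (by omega)]
    refine ⟨hlen, hrows, fun r _ _ _ => rfl, fun j hj0 hjt => by omega⟩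
  | succ t ht ih =>
    intro htn
    obtain ⟨L1, L2, L3, L4⟩ := ih (by omega)
    rw [PySem.List.pyRange_one_succ_right (by omega), List.foldl_append]
    set dp' := (PySem.List.pyRange 0 t 1).foldl (innerA n i) dp with hdp'
    simp only [List.foldl_cons, List.foldl_nil]
    have hro : PySem.List.pyGetD dp' (i - 1) [] = PySem.List.pyGetD dp (i - 1) [] :=
      L3 (i - 1) (by omega) (by omega) (by omega)
    have hm1 : 0 ≤ PySem.Int.mod (n - t - 1) n := PySem.Int.mod_nonneg _ (by omega)
    have hm2 : PySem.Int.mod (n - t - 1) n < n := PySem.Int.mod_lt _ (by omega)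
    have hm3 : 0 ≤ PySem.Int.mod (n - t + 1) n := PySem.Int.mod_nonneg _ (by omega)
    have hm4 : PySem.Int.mod (n - t + 1) n < n := PySem.Int.mod_lt _ (by omega)
    have hval : PySem.List.pyGetD (PySem.List.pyGetD dp' (i - 1) []) (PySem.Int.mod (n - t - 1) n) 0
        + PySem.List.pyGetD (PySem.List.pyGetD dp' (i - 1) []) (PySem.Int.mod (n - t + 1) n) 0
        = gB n i t := by
      rw [hro, hprev _ hm1 hm2, hprev _ hm3 hm4, ← gB_step n i t hi2]
    have hri : PySem.List.pyGetD dp' i [] = dp'.getD i.toNat [] :=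
      pyGetD_at _ _ _ 31 L1 (by omega) (by omega)
    have hrilen : (dp'.getD i.toNat []).length = 31 := L2 i.toNat (by omega)
    have hnew : innerA n i dp' t =
        dp'.set i.toNat ((dp'.getD i.toNat []).set t.toNat (gB n i t)) := by
      unfold innerA
      rw [hval, hri]
      rw [pySetD_at _ _ _ 31 hrilen ht (by omega)]
      rw [pySetD_at _ _ _ 31 L1 (by omega) (by omega)]
    rw [hnew]
    have hlen'' : (dp'.set i.toNat ((dp'.getD i.toNat []).set t.toNat (gB n i t))).length = 31 := by
      simp [L1]
    refine ⟨hlen'', ?_, ?_, ?_⟩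
    · intro r hr
      rw [getD_set' _ _ _ _ _ (by omega)]
      split_ifs with h
      · simpa [List.length_set, List.getD] using hrilen
      · exact L2 r hr
    · intro r hr0 hr31 hrne
      rw [pyGetD_at _ _ _ 31 hlen'' hr0 hr31, ← L3 r hr0 hr31 hrne,
        pyGetD_at _ _ _ 31 L1 hr0 hr31, getD_set' _ _ _ _ _ (by omega),
        if_neg (by intro hc; exact hrne (by omega))]
    · intro j hj0 hjt
      rw [pyGetD_at _ _ _ 31 hlen'' (by omega) (by omega)]
      rw [getD_set' _ _ _ _ _ (by omega), if_pos ⟨rfl, by omega⟩]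
      rw [pyGetD_at _ _ _ 31 (by rw [List.length_set]; exact hrilen) hj0 (by omega)]
      rw [getD_set' _ _ _ _ _ (by omega)]
      by_cases hj : j = t
      · rw [if_pos (by constructor <;> omega), hj]
      · rw [if_neg (by intro hc; exact hj (by omega))]
        rw [← pyGetD_at _ _ _ 31 hrilen hj0 (by omega), ← hri]
        exact L4 j hj0 (by omega)

theorem outer_inv (n : Int) (hn1 : 1 ≤ n) (hn31 : n ≤ 31) :
    ∀ k : Int, 1 ≤ k → k ≤ 30 →
      (loopA n k).length = 31 ∧
      (∀ r : Nat, r < 31 → ((loopA n k).getD r []).length = 31) ∧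
      (∀ i j : Int, 1 ≤ i → i ≤ k → 0 ≤ j → j < n →
        PySem.List.pyGetD (PySem.List.pyGetD (loopA n k) i []) j 0 = gB n i j) := by
  intro k hk1
  induction k, hk1 using Int.le_induction with
  | base =>
    intro _
    have hloop : loopA n 1 = baseTable n := by
      unfold loopA
      rw [show (1:Int) + 1 = 2 by norm_num, PySem.List.pyRange_one_eq_nil (a := 2) (b := 2) (by omega)]
      rfl
    rw [hloop]
    refine ⟨by rw [baseTable_eq]; simp, ?_, ?_⟩
    · intro r hr
      rw [baseTable_eq, getD_set' _ _ _ _ _ (by simpa using hr)]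
      split_ifs with h
      · exact rowBase_length n
      · rw [getD_replicate _ _ _ _ (by omega)]
        simp
    · intro i j hi1 hik hj0 hjn
      have hi : i = 1 := by omega
      subst hi
      rw [baseTable_read n 1 (by omega) (by omega) (by omega) (by omega),
        if_pos (Or.inl rfl), rowBase_get n j hn1 hn31 hj0 hjn, gB_one]
  | succ k hk ih =>
    intro hk30
    obtain ⟨O1, O2, O3⟩ := ih (by omega)
    have hsplit : loopA n (k + 1) = (PySem.List.pyRange 0 n 1).foldl (innerA n (k + 1)) (loopA n k) := by
      unfold loopA
      rw [show k + 1 + 1 = (k + 1) + 1 by ring, PySem.List.pyRange_one_succ_right (by omega),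
        List.foldl_append]
      simp only [List.foldl_cons, List.foldl_nil]
    have hprev : ∀ j : Int, 0 ≤ j → j < n →
        PySem.List.pyGetD (PySem.List.pyGetD (loopA n k) (k + 1 - 1) []) j 0 = gB n (k + 1 - 1) j := by
      intro j hj0 hjn
      rw [show k + 1 - 1 = k by ring]
      exact O3 k j (by omega) le_rfl hj0 hjn
    obtain ⟨A1, A2, A3, A4⟩ := inner_aux n (k + 1) hn1 hn31 (by omega) (by omega)
      (loopA n k) O1 O2 hprev n (by omega) le_rfl
    rw [hsplit]
    refine ⟨A1, A2, ?_⟩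
    intro i j hi1 hik hj0 hjn
    by_cases hi : i = k + 1
    · subst hi
      exact A4 j hj0 hjn
    · rw [A3 i (by omega) (by omega) hi]
      exact O3 i j hi1 (by omega) hj0 hjn

theorem main_eq (n m : Int)
    (hn1 : -30 ≤ n) (hn2 : n ≤ 31) (hm1 : -31 ≤ m) (hm2 : m ≤ 30) (hnz : ¬(n = 0 ∧ 2 ≤ m))
    (hD : ¬((n = 1 ∧ m = -30) ∨ (n = -30 ∧ m = 1) ∨ (n = -30 ∧ m = -30))) :
    PySem.List.pyGetD (PySem.List.pyGetD (loopA n m) m []) 0 0 = gB n m 0 := by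
  by_cases hm : m ≤ 1
  · have hloop : loopA n m = baseTable n := by
      unfold loopA
      rw [PySem.List.pyRange_one_eq_nil (a := 2) (b := m + 1) (by omega)]
      rfl
    rw [hloop, baseTable_read n m hn1 hn2 hm1 hm2]
    by_cases h1 : m = 1 ∨ m = -30
    · rw [if_pos h1, rowBase_zero n hn1 hn2]
      rcases h1 with h1 | h1 <;> subst h1
      · rw [gB_one]
        by_cases hn : n = 1
        · simp [hn]
        · have hn30 : ¬(n = -30) := fun hc => hD (Or.inr (Or.inl ⟨hc, rfl⟩))
          rw [if_neg (by tauto), if_neg (by omega)]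
      · rw [gB_lt_one n _ _ (by omega)]
        rw [if_neg ?_]
        intro hc
        rcases hc with hc | hc
        · exact hD (Or.inl ⟨hc, rfl⟩)
        · exact hD (Or.inr (Or.inr ⟨hc, rfl⟩))
    · rw [if_neg h1]
      have hz : PySem.List.pyGetD (List.replicate 31 (0:Int)) 0 0 = 0 := rfl
      rw [hz, gB_lt_one n _ _ (by omega)]
  · have hm' : 2 ≤ m := by omega
    by_cases hn : n ≤ -1
    · have hloop : loopA n m = baseTable n := by
        unfold loopA
        rw [PySem.List.pyRange_one_eq_nil (a := 0) (b := n) (by omega)]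
        simp only [List.foldl_nil]
        exact foldl_id _ _
      rw [hloop, baseTable_read n m hn1 hn2 hm1 hm2, if_neg (by omega)]
      have hz : PySem.List.pyGetD (List.replicate 31 (0:Int)) 0 0 = 0 := rfl
      rw [hz, gB_step n m 0 hm']
      have hb1 := PySem.Int.mod_neg_bounds (a := n - 0 - 1) (b := n) (by omega)
      have hb2 := PySem.Int.mod_neg_bounds (a := n - 0 + 1) (b := n) (by omega)
      rw [gB_neg n (by omega) (m-1).toNat _ _ le_rfl hb1.1 hb1.2,
        gB_neg n (by omega) (m-1).toNat _ _ le_rfl hb2.1 hb2.2]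
      norm_num
    · have hn' : 1 ≤ n := by omega
      obtain ⟨O1, O2, O3⟩ := outer_inv n hn' hn2 m (by omega) (by omega)
      exact O3 m 0 (by omega) le_rfl le_rfl (by omega)

theorem solution_spec : Claim_unchanged_solution := by
  intro n m _ hpre
  unfold Spec_solution
  intro hD
  unfold Pre_solution at hpre
  unfold D_solution at hD
  rw [solution_eq_read, solution_alt_eq]
  exact main_eq n m hpre.1.1 hpre.1.2 hpre.2.1.1 hpre.2.1.2 hpre.2.2 hD

theorem solution_changed : Claim_changed_solution := by
  unfold Claim_changed_solution
  refine ⟨by decide, by decide, by decide, by decide, ?_, by decide⟩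
  show solution_alt 1 (-30) = 0
  rw [solution_alt_eq, gB_lt_one _ _ _ (by omega)]

theorem solution_tight : Claim_exact_solution := by
  intro n m _ _ hd
  rcases hd with ⟨h1, h2⟩ | ⟨h1, h2⟩ | ⟨h1, h2⟩ <;> subst h1 <;> subst h2
  · rw [show solution_alt 1 (-30) = 0 from by rw [solution_alt_eq, gB_lt_one _ _ _ (by omega)]]
    decide
  · rw [show solution_alt (-30) 1 = 0 from by rw [solution_alt_eq, gB_one]; norm_num]
    decide
  · rw [show solution_alt (-30) (-30) = 0 from by rw [solution_alt_eq, gB_lt_one _ _ _ (by omega)]]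
    decide
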